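-- pv_equiv track=rewrite | github.com/B0mM3L6000/EiP | Muster/aufgabe24_acw.py | count_free
-- ===== SOURCE A (Python) =====
-- def count_free(feld, zeile, spalte):
--     counter = 0
--     for horizontal in [-1, 0, 1]:
--         for vertikal in [-1, 0, 1]:
--             tmp_zeile = zeile + vertikal
--             tmp_spalte = spalte + horizontal
--             if 0 <= tmp_zeile < 7 and 0 <= tmp_spalte < 7:
--                 if feld[tmp_zeile][tmp_spalte] == -1:
--                     counter += 1
--     return counter
-- ===== SOURCE B (Python) =====
-- def count_free(feld, zeile, spalte):
--     rlo = max(0, zeile - 1)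
--     rhi = max(0, min(7, zeile + 2))
--     clo = max(0, spalte - 1)
--     chi = max(0, min(7, spalte + 2))
--     return sum(row[clo:chi].count(-1) for row in feld[rlo:rhi])
-- ===== Notes on version B (the rewrite author's own statement) =====
-- stated objective: simpler
-- what changed: Replaces the nine per-offset iterations with per-cell bounds guards by computing the clamped row/column windows once and counting -1 over the two resulting slices.
import Mathlib
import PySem

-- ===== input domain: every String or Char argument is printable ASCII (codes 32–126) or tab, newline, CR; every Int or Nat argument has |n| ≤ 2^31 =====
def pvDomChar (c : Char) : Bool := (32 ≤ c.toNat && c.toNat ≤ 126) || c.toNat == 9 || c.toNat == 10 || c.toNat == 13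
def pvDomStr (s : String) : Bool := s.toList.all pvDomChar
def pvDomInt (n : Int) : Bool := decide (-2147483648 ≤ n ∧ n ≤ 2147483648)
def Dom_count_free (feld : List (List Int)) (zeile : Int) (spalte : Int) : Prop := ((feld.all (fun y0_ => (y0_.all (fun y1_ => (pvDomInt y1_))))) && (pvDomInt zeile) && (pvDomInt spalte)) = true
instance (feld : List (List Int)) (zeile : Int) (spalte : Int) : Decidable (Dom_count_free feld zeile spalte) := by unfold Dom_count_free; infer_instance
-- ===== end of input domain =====

-- B replaces the nine guarded per-offset probes by two clamped window slices and a count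
-- over the in-range sub-grid (objective: simpler; return value only).

-- ===== PORT A =====
def count_free (feld : List (List Int)) (zeile : Int) (spalte : Int) : Int :=
  ([-1, 0, 1] : List Int).foldl (fun counter horizontal =>
    ([-1, 0, 1] : List Int).foldl (fun counter vertikal =>
      let tmp_zeile := zeile + vertikal
      let tmp_spalte := spalte + horizontal
      if 0 ≤ tmp_zeile ∧ tmp_zeile < 7 ∧ 0 ≤ tmp_spalte ∧ tmp_spalte < 7 then
        if PySem.List.pyGetD (PySem.List.pyGetD feld tmp_zeile []) tmp_spalte 0 = -1 then
          counter + 1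
        else counter
      else counter) counter) 0

-- ===== PORT B =====
def count_free_alt (feld : List (List Int)) (zeile : Int) (spalte : Int) : Int :=
  let rlo := max 0 (zeile - 1)
  let rhi := max 0 (min 7 (zeile + 2))
  let clo := max 0 (spalte - 1)
  let chi := max 0 (min 7 (spalte + 2))
  ((PySem.List.slice feld (some rlo) (some rhi)).map
    (fun row => ((PySem.List.count (PySem.List.slice row (some clo) (some chi)) (-1) : Nat) : Int))).sum

-- ===== PRECONDITION & SPEC =====
-- Pre_ excludes exactly the inputs where A raises IndexError: some cell of the in-bounds
-- 3x3 window is missing from the grid (too few rows, or a row too short).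
def Pre_count_free (feld : List (List Int)) (zeile : Int) (spalte : Int) : Prop :=
  ∀ v ∈ ([-1, 0, 1] : List Int), ∀ h ∈ ([-1, 0, 1] : List Int),
    0 ≤ zeile + v → zeile + v < 7 → 0 ≤ spalte + h → spalte + h < 7 →
      zeile + v < (feld.length : Int) ∧
      spalte + h < (((feld.getD (zeile + v).toNat []).length : Int))
instance (feld : List (List Int)) (zeile : Int) (spalte : Int) : Decidable (Pre_count_free feld zeile spalte) := by unfold Pre_count_free; infer_instance

def pvWitness_count_free : List (List Int) × Int × Int := ([[-1, -1], [0, -1]], 0, 0)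

def Spec_count_free (feld : List (List Int)) (zeile : Int) (spalte : Int) (out : Int) : Prop := out = count_free_alt feld zeile spalte
instance (feld : List (List Int)) (zeile : Int) (spalte : Int) (out : Int) : Decidable (Spec_count_free feld zeile spalte out) := by unfold Spec_count_free; infer_instance

-- ===== CLAIM (what is proved, stated in full; the proofs are below) =====
def Claim_equal_count_free : Prop := ∀ (feld : List (List Int)) (zeile : Int) (spalte : Int), Dom_count_free feld zeile spalte → Pre_count_free feld zeile spalte → Spec_count_free feld zeile spalte (count_free feld zeile spalte)

-- ===== LEMMAS AND PROOFS =====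

-- one cell's contribution in A, as a 0/1 term
def Tcell (feld : List (List Int)) (z s v h : Int) : Int :=
  if (0 ≤ z + v ∧ z + v < 7 ∧ 0 ≤ s + h ∧ s + h < 7) ∧
     PySem.List.pyGetD (PySem.List.pyGetD feld (z + v) []) (s + h) 0 = -1 then 1 else 0

theorem step_add (c : Int) (G E : Prop) [Decidable G] [Decidable E] :
    (if G then (if E then c + 1 else c) else c) = c + (if G ∧ E then 1 else 0) := by
  by_cases hG : G <;> by_cases hE : E <;> simp [hG, hE]

theorem A_eq (feld : List (List Int)) (z s : Int) :
    count_free feld z s =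
      (Tcell feld z s (-1) (-1) + Tcell feld z s (-1) 0 + Tcell feld z s (-1) 1)
    + (Tcell feld z s 0 (-1) + Tcell feld z s 0 0 + Tcell feld z s 0 1)
    + (Tcell feld z s 1 (-1) + Tcell feld z s 1 0 + Tcell feld z s 1 1) := by
  simp only [count_free, List.foldl_cons, List.foldl_nil, step_add, Tcell]
  ring

theorem dt_succ {α : Type} (l : List α) (d : α) (n k : Nat) (h : n < l.length) :
    (l.drop n).take (k + 1) = l.getD n d :: ((l.drop (n + 1)).take k) := by
  rw [List.drop_eq_getElem_cons h, List.getD_eq_getElem l d h, List.take_succ_cons]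

theorem dt1 {α : Type} (l : List α) (f : α → Int) (d : α) (n : Nat) (h : n + 1 ≤ l.length) :
    ((List.take 1 (List.drop n l)).map f).sum = f (l.getD n d) := by
  rw [show (1:Nat) = 0 + 1 from rfl, dt_succ l d n 0 (by omega)]; simp

theorem dt2 {α : Type} (l : List α) (f : α → Int) (d : α) (n : Nat) (h : n + 2 ≤ l.length) :
    ((List.take 2 (List.drop n l)).map f).sum = f (l.getD n d) + f (l.getD (n+1) d) := by
  rw [show (2:Nat) = 1 + 1 from rfl, dt_succ l d n 1 (by omega),
      show (1:Nat) = 0 + 1 from rfl, dt_succ l d (n+1) 0 (by omega)]; simp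

theorem dt3 {α : Type} (l : List α) (f : α → Int) (d : α) (n : Nat) (h : n + 3 ≤ l.length) :
    ((List.take 3 (List.drop n l)).map f).sum = f (l.getD n d) + f (l.getD (n+1) d) + f (l.getD (n+2) d) := by
  rw [show (3:Nat) = 2 + 1 from rfl, dt_succ l d n 2 (by omega),
      show (2:Nat) = 1 + 1 from rfl, dt_succ l d (n+1) 1 (by omega),
      show (1:Nat) = 0 + 1 from rfl, dt_succ l d (n+2) 0 (by omega)]
  simp; ring

theorem window {α : Type} (l : List α) (f : α → Int) (d : α) (z : Int)
    (hlen : ∀ r : Int, 0 ≤ r → r < 7 → z - 1 ≤ r → r < z + 2 → r < (l.length : Int)) :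
    ((PySem.List.slice l (some (max 0 (z - 1))) (some (max 0 (min 7 (z + 2))))).map f).sum
    = (if 0 ≤ z - 1 ∧ z - 1 < 7 then f (l.getD (z - 1).toNat d) else 0)
    + (if 0 ≤ z ∧ z < 7 then f (l.getD z.toNat d) else 0)
    + (if 0 ≤ z + 1 ∧ z + 1 < 7 then f (l.getD (z + 1).toNat d) else 0) := by
  rw [PySem.List.slice_toNat l (le_max_left 0 (z - 1)) (le_max_left 0 (min 7 (z + 2)))]
  rcases lt_or_ge z (-1) with hz | hz
  · have h1 : (max 0 (min 7 (z + 2))).toNat - (max 0 (z - 1)).toNat = 0 := by omega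
    rw [h1, if_neg (by omega), if_neg (by omega), if_neg (by omega)]
    simp
  rcases lt_or_ge 7 z with hz2 | hz2
  · have h1 : (max 0 (min 7 (z + 2))).toNat - (max 0 (z - 1)).toNat = 0 := by omega
    rw [h1, if_neg (by omega), if_neg (by omega), if_neg (by omega)]
    simp
  interval_cases z
  · -- z = -1
    have hL : 1 ≤ l.length := by have := hlen 0 (by norm_num) (by norm_num) (by norm_num) (by norm_num); omega
    rw [show (max 0 (min 7 ((-1:Int) + 2))).toNat - (max 0 ((-1:Int) - 1)).toNat = 1 from by omega,
        show (max 0 ((-1:Int) - 1)).toNat = 0 from by omega,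
        dt1 l f d 0 (by omega)]
    norm_num [show Int.toNat 2 = 2 from rfl, show Int.toNat 3 = 3 from rfl, show Int.toNat 4 = 4 from rfl, show Int.toNat 5 = 5 from rfl, show Int.toNat 6 = 6 from rfl]
  · -- z = 0
    have hL : 2 ≤ l.length := by have := hlen 1 (by norm_num) (by norm_num) (by norm_num) (by norm_num); omega
    rw [show (max 0 (min 7 ((0:Int) + 2))).toNat - (max 0 ((0:Int) - 1)).toNat = 2 from by omega,
        show (max 0 ((0:Int) - 1)).toNat = 0 from by omega,
        dt2 l f d 0 (by omega)]
    norm_num [show Int.toNat 2 = 2 from rfl, show Int.toNat 3 = 3 from rfl, show Int.toNat 4 = 4 from rfl, show Int.toNat 5 = 5 from rfl, show Int.toNat 6 = 6 from rfl]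
  · -- z = 1
    have hL : 3 ≤ l.length := by have := hlen 2 (by norm_num) (by norm_num) (by norm_num) (by norm_num); omega
    rw [show (max 0 (min 7 ((1:Int) + 2))).toNat - (max 0 ((1:Int) - 1)).toNat = 3 from by omega,
        show (max 0 ((1:Int) - 1)).toNat = 0 from by omega,
        dt3 l f d 0 (by omega)]
    norm_num [show Int.toNat 2 = 2 from rfl, show Int.toNat 3 = 3 from rfl, show Int.toNat 4 = 4 from rfl, show Int.toNat 5 = 5 from rfl, show Int.toNat 6 = 6 from rfl]
  · -- z = 2
    have hL : 4 ≤ l.length := by have := hlen 3 (by norm_num) (by norm_num) (by norm_num) (by norm_num); omega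
    rw [show (max 0 (min 7 ((2:Int) + 2))).toNat - (max 0 ((2:Int) - 1)).toNat = 3 from by omega,
        show (max 0 ((2:Int) - 1)).toNat = 1 from by omega,
        dt3 l f d 1 (by omega)]
    norm_num [show Int.toNat 2 = 2 from rfl, show Int.toNat 3 = 3 from rfl, show Int.toNat 4 = 4 from rfl, show Int.toNat 5 = 5 from rfl, show Int.toNat 6 = 6 from rfl]
  · -- z = 3
    have hL : 5 ≤ l.length := by have := hlen 4 (by norm_num) (by norm_num) (by norm_num) (by norm_num); omega
    rw [show (max 0 (min 7 ((3:Int) + 2))).toNat - (max 0 ((3:Int) - 1)).toNat = 3 from by omega,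
        show (max 0 ((3:Int) - 1)).toNat = 2 from by omega,
        dt3 l f d 2 (by omega)]
    norm_num [show Int.toNat 2 = 2 from rfl, show Int.toNat 3 = 3 from rfl, show Int.toNat 4 = 4 from rfl, show Int.toNat 5 = 5 from rfl, show Int.toNat 6 = 6 from rfl]
  · -- z = 4
    have hL : 6 ≤ l.length := by have := hlen 5 (by norm_num) (by norm_num) (by norm_num) (by norm_num); omega
    rw [show (max 0 (min 7 ((4:Int) + 2))).toNat - (max 0 ((4:Int) - 1)).toNat = 3 from by omega,
        show (max 0 ((4:Int) - 1)).toNat = 3 from by omega,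
        dt3 l f d 3 (by omega)]
    norm_num [show Int.toNat 2 = 2 from rfl, show Int.toNat 3 = 3 from rfl, show Int.toNat 4 = 4 from rfl, show Int.toNat 5 = 5 from rfl, show Int.toNat 6 = 6 from rfl]
  · -- z = 5
    have hL : 7 ≤ l.length := by have := hlen 6 (by norm_num) (by norm_num) (by norm_num) (by norm_num); omega
    rw [show (max 0 (min 7 ((5:Int) + 2))).toNat - (max 0 ((5:Int) - 1)).toNat = 3 from by omega,
        show (max 0 ((5:Int) - 1)).toNat = 4 from by omega,
        dt3 l f d 4 (by omega)]
    norm_num [show Int.toNat 2 = 2 from rfl, show Int.toNat 3 = 3 from rfl, show Int.toNat 4 = 4 from rfl, show Int.toNat 5 = 5 from rfl, show Int.toNat 6 = 6 from rfl]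
  · -- z = 6
    have hL : 7 ≤ l.length := by have := hlen 6 (by norm_num) (by norm_num) (by norm_num) (by norm_num); omega
    rw [show (max 0 (min 7 ((6:Int) + 2))).toNat - (max 0 ((6:Int) - 1)).toNat = 2 from by omega,
        show (max 0 ((6:Int) - 1)).toNat = 5 from by omega,
        dt2 l f d 5 (by omega)]
    norm_num [show Int.toNat 2 = 2 from rfl, show Int.toNat 3 = 3 from rfl, show Int.toNat 4 = 4 from rfl, show Int.toNat 5 = 5 from rfl, show Int.toNat 6 = 6 from rfl]
  · -- z = 7
    have hL : 7 ≤ l.length := by have := hlen 6 (by norm_num) (by norm_num) (by norm_num) (by norm_num); omega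
    rw [show (max 0 (min 7 ((7:Int) + 2))).toNat - (max 0 ((7:Int) - 1)).toNat = 1 from by omega,
        show (max 0 ((7:Int) - 1)).toNat = 6 from by omega,
        dt1 l f d 6 (by omega)]
    norm_num [show Int.toNat 2 = 2 from rfl, show Int.toNat 3 = 3 from rfl, show Int.toNat 4 = 4 from rfl, show Int.toNat 5 = 5 from rfl, show Int.toNat 6 = 6 from rfl]

theorem count_as_sum (l : List Int) (v : Int) :
    ((List.count v l : Nat) : Int) = (l.map (fun x => if x = v then (1 : Int) else 0)).sum := by
  have h := PySem.List.sum_map_ite_one_zero (fun x => x == v) l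
  simp only [beq_iff_eq] at h
  rw [h, List.count_eq_countP]

theorem AB (feld : List (List Int)) (z s : Int) (hpre : Pre_count_free feld z s) :
    count_free feld z s = count_free_alt feld z s := by
  have hmem : ∀ t : Int, -1 ≤ t → t ≤ 1 → t ∈ ([-1, 0, 1] : List Int) := by
    intro t h1 h2; interval_cases t <;> simp
  simp only [count_free_alt]
  by_cases hs : -1 ≤ s ∧ s ≤ 7
  · have hlenout : ∀ r : Int, 0 ≤ r → r < 7 → z - 1 ≤ r → r < z + 2 → r < (feld.length : Int) := by
      intro r h0 h7 hlo hhi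
      have := hpre (r - z) (hmem _ (by omega) (by omega)) (max 0 (s - 1) - s)
        (hmem _ (by omega) (by omega)) (by omega) (by omega) (by omega) (by omega)
      omega
    have key : ∀ v : Int, -1 ≤ v → v ≤ 1 →
        Tcell feld z s v (-1) + Tcell feld z s v 0 + Tcell feld z s v 1
        = if 0 ≤ z + v ∧ z + v < 7 then
            ((PySem.List.count (PySem.List.slice (feld.getD (z + v).toNat [])
              (some (max 0 (s - 1))) (some (max 0 (min 7 (s + 2))))) (-1) : Nat) : Int)
          else 0 := by
      intro v hv1 hv2
      by_cases hrv : 0 ≤ z + v ∧ z + v < 7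
      · rw [if_pos hrv]
        set row := feld.getD (z + v).toNat [] with hrow
        have hlenin : ∀ c : Int, 0 ≤ c → c < 7 → s - 1 ≤ c → c < s + 2 → c < (row.length : Int) := by
          intro c h0 h7 hlo hhi
          have := hpre v (hmem v hv1 hv2) (c - s) (hmem _ (by omega) (by omega))
            hrv.1 hrv.2 (by omega) (by omega)
          rw [hrow]; omega
        rw [PySem.List.count_eq, count_as_sum, window row _ 0 s hlenin]
        have hcell : ∀ h : Int, -1 ≤ h → h ≤ 1 →
            Tcell feld z s v h
            = (if 0 ≤ s + h ∧ s + h < 7 then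
                (fun x => if x = (-1 : Int) then (1 : Int) else 0) (row.getD (s + h).toNat 0)
               else 0) := by
          intro h h1 h2
          by_cases hc : 0 ≤ s + h ∧ s + h < 7
          · rw [if_pos hc]; unfold Tcell
            rw [PySem.List.pyGetD_of_nonneg feld [] hrv.1,
                PySem.List.pyGetD_of_nonneg _ (0 : Int) hc.1, ← hrow]
            by_cases he : row.getD (s + h).toNat 0 = -1
            · rw [if_pos ⟨⟨hrv.1, hrv.2, hc.1, hc.2⟩, he⟩]
              show (1 : Int) = if row.getD (s + h).toNat 0 = (-1 : Int) then (1 : Int) else 0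
              rw [if_pos he]
            · rw [if_neg (fun hx => he hx.2)]
              show (0 : Int) = if row.getD (s + h).toNat 0 = (-1 : Int) then (1 : Int) else 0
              rw [if_neg he]
          · rw [if_neg hc]; unfold Tcell
            rw [if_neg (fun hx => hc ⟨hx.1.2.2.1, hx.1.2.2.2⟩)]
        have c1 := hcell (-1) (by norm_num) (by norm_num)
        rw [show s + (-1) = s - 1 from by ring] at c1
        have c2 := hcell 0 (by norm_num) (by norm_num)
        rw [show s + 0 = s from by ring] at c2
        have c3 := hcell 1 (by norm_num) (by norm_num)
        rw [c1, c2, c3]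
      · rw [if_neg hrv]
        have tz : ∀ h : Int, Tcell feld z s v h = 0 := by
          intro h; unfold Tcell
          rw [if_neg (fun hx => hrv ⟨hx.1.1, hx.1.2.1⟩)]
        rw [tz, tz, tz]; ring
    rw [A_eq, window feld _ [] z hlenout]
    have k1 := key (-1) (by norm_num) (by norm_num)
    rw [show z + (-1) = z - 1 from by ring] at k1
    have k2 := key 0 (by norm_num) (by norm_num)
    rw [show z + 0 = z from by ring] at k2
    have k3 := key 1 (by norm_num) (by norm_num)
    rw [k1, k2, k3]
  · have hcol0 : ∀ row : List Int,
        ((PySem.List.count (PySem.List.slice row (some (max 0 (s - 1)))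
            (some (max 0 (min 7 (s + 2))))) (-1) : Nat) : Int) = 0 := by
      intro row
      rw [PySem.List.slice_toNat row (le_max_left 0 (s - 1)) (le_max_left 0 (min 7 (s + 2))),
          show (max 0 (min 7 (s + 2))).toNat - (max 0 (s - 1)).toNat = 0 from by omega]
      simp [PySem.List.count_eq]
    have t1 : ∀ v : Int, Tcell feld z s v (-1) = 0 := by
      intro v; unfold Tcell
      rw [if_neg (fun hx => hs ⟨by omega, by omega⟩)]
    have t2 : ∀ v : Int, Tcell feld z s v 0 = 0 := by
      intro v; unfold Tcell
      rw [if_neg (fun hx => hs ⟨by omega, by omega⟩)]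
    have t3 : ∀ v : Int, Tcell feld z s v 1 = 0 := by
      intro v; unfold Tcell
      rw [if_neg (fun hx => hs ⟨by omega, by omega⟩)]
    rw [A_eq]
    simp only [t1, t2, t3, hcol0]
    simp

-- ===== VERDICT (by name: the statement is the Claim_ definition above) =====
theorem count_free_spec : Claim_equal_count_free := by
  intro feld z s _ hpre
  unfold Spec_count_free
  exact AB feld z s hpre
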